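-- pv_equiv track=rewrite | github.com/dydtkddl/qcviz-v04 | docs/20260331_external_llm_audit/QCVIZ_CORE_EXTERNAL_SCAN_BUNDLE_2026-03-31/src/qcviz_mcp/web/routes/chat.py | _looks_like_generic_agent_suggestion_list
-- ===== SOURCE A (Python) =====
-- from typing import Any, Dict, List, Mapping, Optional
--
-- _GENERIC_AGENT_SUGGESTION_NAMES = {"water", "methane", "ethanol", "methanol", "benzene"}
--
-- def _safe_str(value: Any, default: str = "") -> str:
--     if value is None:
--         return default
--     return str(value).strip()
--
-- def _looks_like_generic_agent_suggestion_list(suggestions: List[Dict[str, Any]]) -> bool: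
--     names = [
--         _safe_str(item.get("name")).lower()
--         for item in list(suggestions or [])
--         if _safe_str(item.get("name"))
--     ]
--     if not names:
--         return False
--     return set(names).issubset(_GENERIC_AGENT_SUGGESTION_NAMES)
-- ===== SOURCE B (Python) =====
-- from typing import Any, Dict, List
--
-- _GENERIC_AGENT_SUGGESTION_NAMES = {"water", "methane", "ethanol", "methanol", "benzene"}
--
-- def _safe_str(value: Any, default: str = "") -> str:
--     if value is None:
--         return default
--     return str(value).strip()
--
-- def _classify(item) -> int:
--     # 0 = no usable name, 1 = generic name, 2 = non-generic name
--     name = _safe_str(item.get("name"))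
--     if not name:
--         return 0
--     return 1 if name.lower() in _GENERIC_AGENT_SUGGESTION_NAMES else 2
--
-- def _looks_like_generic_agent_suggestion_list(suggestions: List[Dict[str, Any]]) -> bool:
--     # Map each item to a severity code and reduce with max: the list looks generic
--     # exactly when the worst code seen is 1 (some generic name, no non-generic one).
--     return max((_classify(item) for item in (suggestions or [])), default=0) == 1
-- ===== Notes on version B (the rewrite author's own statement) =====
-- stated objective: alternative
-- what changed: Replaces the build-names-list-then-set-subset test with a map-reduce: each item is classified into a numeric severity code (0 no name, 1 generic, 2 non-generic) and the result is whether the max of the codes equals 1.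
import Mathlib
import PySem

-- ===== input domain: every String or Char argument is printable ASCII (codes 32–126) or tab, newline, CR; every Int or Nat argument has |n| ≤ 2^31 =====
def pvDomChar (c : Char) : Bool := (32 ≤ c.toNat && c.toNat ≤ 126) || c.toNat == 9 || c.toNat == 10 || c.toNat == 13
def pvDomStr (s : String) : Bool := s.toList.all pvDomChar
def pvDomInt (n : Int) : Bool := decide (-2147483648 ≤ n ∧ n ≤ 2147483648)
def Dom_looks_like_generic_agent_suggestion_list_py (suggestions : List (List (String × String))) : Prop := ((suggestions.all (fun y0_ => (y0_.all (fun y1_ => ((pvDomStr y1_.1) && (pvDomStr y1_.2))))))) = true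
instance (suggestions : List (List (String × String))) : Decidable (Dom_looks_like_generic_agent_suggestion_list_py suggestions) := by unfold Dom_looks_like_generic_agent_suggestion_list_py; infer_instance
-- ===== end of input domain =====

-- B replaces the names-list-plus-set-subset test by a map-reduce: each item is mapped to a
-- severity code (0 no name, 1 generic, 2 non-generic) and the result is (max of codes == 1).

-- shared module helpers (both Pythons use the same module constants/_safe_str)
def pvGenericNames : PySem.Set String :=
  PySem.Set.ofList ["water", "methane", "ethanol", "methanol", "benzene"]

-- _safe_str applied to item.get("name"): the values are strings, so str(value) is value
def pvSafeStr (value : Option String) : String :=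
  match value with
  | none => ""
  | some s => PySem.Str.strip s

-- ===== PORT A =====
def looks_like_generic_agent_suggestion_list_py (suggestions : List (List (String × String))) : Bool :=
  -- names = [_safe_str(item.get("name")).lower() for item in list(suggestions or []) if _safe_str(item.get("name"))]
  let names :=
    (suggestions.filter (fun item => !(pvSafeStr ((PySem.Dict.mk item).get? "name") == ""))).map
      (fun item => PySem.Str.lower (pvSafeStr ((PySem.Dict.mk item).get? "name")))
  if names.isEmpty then false
  else PySem.Set.issubset (PySem.Set.ofList names) pvGenericNames

-- ===== PORT B =====
-- _classify: 0 = no usable name, 1 = generic name, 2 = non-generic name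
def pvClassify (item : List (String × String)) : Nat :=
  let name := pvSafeStr ((PySem.Dict.mk item).get? "name")
  if name == "" then 0
  else if PySem.Set.contains pvGenericNames (PySem.Str.lower name) then 1 else 2

-- max(gen, default=0) over the classified items, then compared with 1
def looks_like_generic_agent_suggestion_list_py_alt (suggestions : List (List (String × String))) : Bool :=
  ((suggestions.map pvClassify).foldl Nat.max 0) == 1

-- ===== PRECONDITION & SPEC =====
def Spec_looks_like_generic_agent_suggestion_list_py (suggestions : List (List (String × String))) (out : Bool) : Prop := out = looks_like_generic_agent_suggestion_list_py_alt suggestions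
instance (suggestions : List (List (String × String))) (out : Bool) : Decidable (Spec_looks_like_generic_agent_suggestion_list_py suggestions out) := by unfold Spec_looks_like_generic_agent_suggestion_list_py; infer_instance

-- ===== CLAIM (what is proved, stated in full; the proofs are below) =====
def Claim_equal_looks_like_generic_agent_suggestion_list_py : Prop := ∀ (suggestions : List (List (String × String))), Dom_looks_like_generic_agent_suggestion_list_py suggestions → Spec_looks_like_generic_agent_suggestion_list_py suggestions (looks_like_generic_agent_suggestion_list_py suggestions)

-- ===== LEMMAS AND PROOFS =====

-- A's names list, named for the proofs
def pvNamesOf (suggestions : List (List (String × String))) : List String :=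
  (suggestions.filter (fun item => !(pvSafeStr ((PySem.Dict.mk item).get? "name") == ""))).map
    (fun item => PySem.Str.lower (pvSafeStr ((PySem.Dict.mk item).get? "name")))

lemma pvNamesOf_cons_skip (item : List (String × String)) (rest : List (List (String × String)))
    (h : (pvSafeStr ((PySem.Dict.mk item).get? "name") == "") = true) :
    pvNamesOf (item :: rest) = pvNamesOf rest := by
  simp only [pvNamesOf, List.filter_cons, h, Bool.not_true, if_neg (Bool.false_ne_true)]

lemma pvNamesOf_cons_keep (item : List (String × String)) (rest : List (List (String × String)))
    (h : (pvSafeStr ((PySem.Dict.mk item).get? "name") == "") = false) :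
    pvNamesOf (item :: rest) =
      PySem.Str.lower (pvSafeStr ((PySem.Dict.mk item).get? "name")) :: pvNamesOf rest := by
  simp [pvNamesOf, h]

-- abbreviation for B's reduction value, for the proofs
def pvMaxCode (suggestions : List (List (String × String))) : Nat :=
  (suggestions.map pvClassify).foldl Nat.max 0

lemma pvZeroMax (n : Nat) : Nat.max 0 n = n := Nat.zero_max ..

lemma pvMaxAssoc (a b c : Nat) : Nat.max (Nat.max a b) c = Nat.max a (Nat.max b c) := Nat.max_assoc ..

lemma pvMaxLe (a b c : Nat) : Nat.max a b ≤ c ↔ a ≤ c ∧ b ≤ c := Nat.max_le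

lemma foldl_max_shift (l : List Nat) (a : Nat) :
    l.foldl Nat.max a = Nat.max a (l.foldl Nat.max 0) := by
  induction l generalizing a with
  | nil => simp
  | cons b l ih =>
    simp only [List.foldl_cons]
    rw [ih (Nat.max a b), ih (Nat.max 0 b), pvZeroMax, ← pvMaxAssoc]

lemma pvMaxCode_cons (item : List (String × String)) (rest : List (List (String × String))) :
    pvMaxCode (item :: rest) = Nat.max (pvClassify item) (pvMaxCode rest) := by
  simp only [pvMaxCode, List.map_cons, List.foldl_cons]
  rw [foldl_max_shift, pvZeroMax]

lemma pvMaxCode_le_one (s : List (List (String × String))) :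
    (pvMaxCode s ≤ 1) ↔ ((pvNamesOf s).all (fun n => PySem.Set.contains pvGenericNames n) = true) := by
  induction s with
  | nil => simp [pvMaxCode, pvNamesOf]
  | cons item rest ih =>
    rw [pvMaxCode_cons]
    by_cases h : (pvSafeStr ((PySem.Dict.mk item).get? "name") == "") = true
    · rw [pvNamesOf_cons_skip item rest h]
      have hc : pvClassify item = 0 := by
        simp [pvClassify, h, -PySem.Set.contains_eq_listContains]
      rw [hc, pvZeroMax]
      exact ih
    · have h' := Bool.eq_false_iff.mpr h
      rw [pvNamesOf_cons_keep item rest h', List.all_cons]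
      cases hg : PySem.Set.contains pvGenericNames
          (PySem.Str.lower (pvSafeStr ((PySem.Dict.mk item).get? "name"))) with
      | true =>
        have hc : pvClassify item = 1 := by
          simp [pvClassify, h', hg, -PySem.Set.contains_eq_listContains]
        rw [hc, Bool.true_and, pvMaxLe]
        simp only [le_refl, true_and]
        exact ih
      | false =>
        have hc : pvClassify item = 2 := by
          simp [pvClassify, h', hg, -PySem.Set.contains_eq_listContains]
        rw [hc, Bool.false_and]
        simp

lemma pvMaxCode_pos (s : List (List (String × String))) :
    (1 ≤ pvMaxCode s) ↔ ((pvNamesOf s).isEmpty = false) := by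
  induction s with
  | nil => simp [pvMaxCode, pvNamesOf]
  | cons item rest ih =>
    rw [pvMaxCode_cons]
    by_cases h : (pvSafeStr ((PySem.Dict.mk item).get? "name") == "") = true
    · rw [pvNamesOf_cons_skip item rest h]
      have hc : pvClassify item = 0 := by
        simp [pvClassify, h, -PySem.Set.contains_eq_listContains]
      rw [hc, pvZeroMax]
      exact ih
    · have h' := Bool.eq_false_iff.mpr h
      rw [pvNamesOf_cons_keep item rest h']
      have hc : 1 ≤ pvClassify item := by
        simp only [pvClassify, h', Bool.false_eq_true, if_false]
        split <;> omega
      simp only [List.isEmpty_cons]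
      exact iff_of_true (le_trans hc (Nat.le_max_left _ _)) trivial

lemma pvIssubset_eq_all (names : List String) :
    PySem.Set.issubset (PySem.Set.ofList names) pvGenericNames =
      names.all (fun n => PySem.Set.contains pvGenericNames n) := by
  rw [Bool.eq_iff_iff, PySem.Set.issubset_iff, List.all_eq_true]
  simp only [PySem.Set.contains_iff, PySem.Set.mem_ofList]

-- ===== VERDICT (by name: the statement is the Claim_ definition above) =====
theorem looks_like_generic_agent_suggestion_list_py_spec : Claim_equal_looks_like_generic_agent_suggestion_list_py := by
  intro s _
  unfold Spec_looks_like_generic_agent_suggestion_list_py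
  unfold looks_like_generic_agent_suggestion_list_py looks_like_generic_agent_suggestion_list_py_alt
  show (if (pvNamesOf s).isEmpty then false
        else PySem.Set.issubset (PySem.Set.ofList (pvNamesOf s)) pvGenericNames) =
       (pvMaxCode s == 1)
  rw [pvIssubset_eq_all]
  have h1 := pvMaxCode_le_one s
  have h2 := pvMaxCode_pos s
  cases he : (pvNamesOf s).isEmpty with
  | true =>
    rw [if_pos rfl]
    have hne : pvMaxCode s ≠ 1 := by
      intro hm
      have hf := h2.mp (by omega)
      rw [he] at hf
      exact Bool.noConfusion hf
    exact (beq_eq_false_iff_ne.mpr hne).symm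
  | false =>
    rw [if_neg Bool.false_ne_true]
    have hpos : 1 ≤ pvMaxCode s := h2.mpr he
    rw [Bool.eq_iff_iff, beq_iff_eq, ← h1]
    omega
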